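-- pv_equiv track=rewrite | github.com/DancingOnAir/LeetcodePythonSolution | Array/2606_find_the_substring_with_maximum_cost.py | maximumCostSubstring1
-- ===== SOURCE A (Python) =====
-- from typing import List
--
-- def maximumCostSubstring1(s: str, chars: str, vals: List[int]) -> int:
--     m = {chars[i]: vals[i] for i in range(len(chars))}
--     res = cur = 0
--     for i, ch in enumerate(s):
--         if ch in m:
--             cur += m[ch]
--         else:
--             cur += ord(ch) - 96
--         if cur < 0:
--             cur = 0
--         res = max(res, cur)
--     return res
-- ===== SOURCE B (Python) =====
-- from typing import List
--
-- def maximumCostSubstring1(s: str, chars: str, vals: List[int]) -> int: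
--     m = dict(zip(chars, vals))
--     prefix = min_prefix = res = 0
--     for ch in s:
--         prefix += m.get(ch, ord(ch) - 96)
--         res = max(res, prefix - min_prefix)
--         min_prefix = min(min_prefix, prefix)
--     return res
-- ===== Notes on version B (the rewrite author's own statement) =====
-- stated objective: alternative
-- what changed: Replaces Kadane's reset-to-zero running accumulator with a prefix-sum scan that subtracts the running minimum prefix (maintaining prefix, min_prefix, res instead of cur, res), and builds the char-value dict from zip(chars, vals) instead of an index comprehension.
import Mathlib
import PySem

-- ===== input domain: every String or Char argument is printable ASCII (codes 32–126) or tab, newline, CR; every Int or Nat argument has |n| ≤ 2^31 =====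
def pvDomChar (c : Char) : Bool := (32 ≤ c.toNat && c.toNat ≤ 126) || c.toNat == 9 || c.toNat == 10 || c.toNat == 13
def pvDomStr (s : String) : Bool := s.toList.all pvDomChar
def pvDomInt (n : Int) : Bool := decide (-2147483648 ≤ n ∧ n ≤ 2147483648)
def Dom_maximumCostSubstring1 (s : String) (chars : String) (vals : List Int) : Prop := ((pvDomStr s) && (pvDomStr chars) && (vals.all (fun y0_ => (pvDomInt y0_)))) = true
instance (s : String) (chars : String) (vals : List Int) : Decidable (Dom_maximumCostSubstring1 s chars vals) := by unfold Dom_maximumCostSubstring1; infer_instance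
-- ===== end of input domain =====

-- B replaces A's Kadane reset-accumulator with a prefix-sum minus running-minimum-prefix scan
-- (and builds the char-value dict from zip instead of an index comprehension); same return value.


-- ===== PORT A =====
-- m = {chars[i]: vals[i] for i in range(len(chars))}
def pvMapA (chars : List Char) (vals : List Int) : PySem.Dict Char Int :=
  (PySem.List.pyRange 0 (chars.length : Int) 1).foldl
    (fun d i => d.insert ((PySem.List.pyGet? chars i).getD ' ')
                         ((PySem.List.pyGet? vals i).getD 0))
    PySem.Dict.empty

-- one iteration of A's 'for i, ch in enumerate(s)' loop; state = (res, cur)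
def pvStepA (m : PySem.Dict Char Int) (rc : Int × Int) (p : Int × Char) : Int × Int :=
  let cur := if m.contains p.2 then rc.2 + (m.get? p.2).getD 0
             else rc.2 + ((p.2.toNat : Int) - 96)
  let cur := if cur < 0 then 0 else cur
  (max rc.1 cur, cur)

def maximumCostSubstring1 (s : String) (chars : String) (vals : List Int) : Int :=
  ((PySem.List.enumerate s.toList).foldl (pvStepA (pvMapA chars.toList vals)) (0, 0)).1

-- ===== PORT B =====
-- m = dict(zip(chars, vals))
def pvMapB (chars : List Char) (vals : List Int) : PySem.Dict Char Int :=
  (chars.zip vals).foldl (fun d p => d.insert p.1 p.2) PySem.Dict.empty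

-- one iteration of B's loop; state = (prefix, min_prefix, res)
def pvStepB (m : PySem.Dict Char Int) (st : Int × Int × Int) (ch : Char) : Int × Int × Int :=
  let pre := st.1 + m.getD ch ((ch.toNat : Int) - 96)
  let res := max st.2.2 (pre - st.2.1)
  let minp := min st.2.1 pre
  (pre, minp, res)

def maximumCostSubstring1_alt (s : String) (chars : String) (vals : List Int) : Int :=
  (s.toList.foldl (pvStepB (pvMapB chars.toList vals)) (0, 0, 0)).2.2

-- ===== PRECONDITION & SPEC =====
-- Pre_ excludes exactly the inputs where A raises IndexError: vals shorter than chars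
-- (the dict comprehension reads vals[i] for every i < len(chars)).
def Pre_maximumCostSubstring1 (s : String) (chars : String) (vals : List Int) : Prop :=
  chars.toList.length ≤ vals.length
instance (s : String) (chars : String) (vals : List Int) : Decidable (Pre_maximumCostSubstring1 s chars vals) := by unfold Pre_maximumCostSubstring1; infer_instance

def pvWitness_maximumCostSubstring1 : String × String × List Int := ("abz!", "ab", [3, -5])

def Spec_maximumCostSubstring1 (s : String) (chars : String) (vals : List Int) (out : Int) : Prop := out = maximumCostSubstring1_alt s chars vals
instance (s : String) (chars : String) (vals : List Int) (out : Int) : Decidable (Spec_maximumCostSubstring1 s chars vals out) := by unfold Spec_maximumCostSubstring1; infer_instance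

-- ===== CLAIM (what is proved, stated in full; the proofs are below) =====
def Claim_equal_maximumCostSubstring1 : Prop := ∀ (s : String) (chars : String) (vals : List Int), Dom_maximumCostSubstring1 s chars vals → Pre_maximumCostSubstring1 s chars vals → Spec_maximumCostSubstring1 s chars vals (maximumCostSubstring1 s chars vals)

-- ===== LEMMAS AND PROOFS =====

-- within Pre_, A's index comprehension builds the same dict as B's zip
lemma pvMap_eq (chars : List Char) (vals : List Int) (h : chars.length ≤ vals.length) :
    pvMapA chars vals = pvMapB chars vals := by
  unfold pvMapA pvMapB
  have hmap : (PySem.List.pyRange 0 (chars.length : Int) 1).map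
      (fun i => (((PySem.List.pyGet? chars i).getD ' '), ((PySem.List.pyGet? vals i).getD 0)))
      = chars.zip vals := by
    apply List.ext_getElem
    · simp [PySem.List.length_pyRange_one]
      omega
    · intro k h1 h2
      have hk : k < chars.length := by
        simpa [PySem.List.length_pyRange_one] using h1
      have hkv : k < vals.length := by omega
      simp [PySem.List.getElem_pyRange_one,
            hk, hkv]
  rw [← hmap, List.foldl_map]

-- A's branch on 'ch in m' computes B's m.get(ch, default)
lemma pvVal_eq (m : PySem.Dict Char Int) (c : Char) (cur dflt : Int) :
    (if m.contains c then cur + (m.get? c).getD 0 else cur + dflt) = cur + m.getD c dflt := by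
  rw [PySem.Dict.contains_eq_isSome_get?, PySem.Dict.getD_eq_get?_getD]
  cases m.get? c <;> simp

-- loop invariant: A's cur = B's prefix - min_prefix, results already agree, res ≥ 0
lemma pvLoop_eq (m : PySem.Dict Char Int) (l : List Char) :
    ∀ (k res cur pre minp : Int), cur = pre - minp → minp ≤ pre → 0 ≤ res →
    ((PySem.List.enumerate l k).foldl (pvStepA m) (res, cur)).1
      = (l.foldl (pvStepB m) (pre, minp, res)).2.2 := by
  induction l with
  | nil => intro k res cur pre minp _ _ _; simp [PySem.List.enumerate]
  | cons ch t ih =>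
    intro k res cur pre minp hc hm hr
    subst hc
    rw [PySem.List.enumerate_cons]
    simp only [List.foldl_cons, pvStepA, pvStepB, pvVal_eq]
    have hres : max res (if pre - minp + m.getD ch ((ch.toNat : Int) - 96) < 0 then 0
          else pre - minp + m.getD ch ((ch.toNat : Int) - 96))
        = max res (pre + m.getD ch ((ch.toNat : Int) - 96) - minp) := by
      split_ifs with h <;> omega
    rw [hres]
    apply ih
    · split_ifs with h <;> omega
    · exact min_le_right _ _
    · omega

-- ===== VERDICT (by name: the statement is the Claim_ definition above) =====
theorem maximumCostSubstring1_spec : Claim_equal_maximumCostSubstring1 := by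
  intro s chars vals _ hpre
  unfold Spec_maximumCostSubstring1 maximumCostSubstring1 maximumCostSubstring1_alt
  rw [pvMap_eq chars.toList vals hpre]
  exact pvLoop_eq _ s.toList 0 0 0 0 0 (by ring) le_rfl le_rfl
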